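-- pv_equiv track=rewrite | github.com/yxngles13/3110PythonNumericalLiteralChecker | hexint.py | is_hexint
-- ===== SOURCE A (Python) =====
-- def is_hexint(s):
--
--     ##if the length of input string is 0, return False
--     if len(s) == 0:
--         return False
--     state = 'q1'
--
--     ##loop through each character in the string
--     for char in s:
--
--         if state == 'q1':
--             #q1 transition q2 if first character is 0
--             if char == '0':
--                 state = 'q2'
--             else:
--                 return False
--
--         elif state == 'q2':
--             #q2 transition to q3 if second character is 'x' or 'X'
--             if char == 'x' or char == 'X':
--                 state = 'q3'
--             else:
--                 return False
--
--         elif state == 'q3':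
--             #check if character is a digit 0-9, a-f, A-F, if so transition to q4
--             if is_hexdigit(char):
--                 state = 'q4'
--             #check if character is underscore, if so transition to q5
--             elif char =='_':
--                 state = 'q5'
--             else:
--                 return False
--         #q3 and q4 look the same but this prevents accepting 0x/0X
--
--         #q4 is accept state
--         elif state == 'q4':
--             #check if character is a digit 0-9, a-f, A-F, if so loop
--             if is_hexdigit(char):
--                 state = 'q4'
--             #check if character is underscore, if so transition to q5
--             elif char =='_':
--                 state = 'q5'
--             else:
--                 return False
--
--             #after underscore, must have digit 0-9, a-f, A-F, transition back to q4
--         elif state == 'q5':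
--             if is_hexdigit(char):
--                 state = 'q4'
--             else:
--                 return False
--
--     ##if we end in accepting state q4, return True
--     if state == 'q4':
--         return True
--     else:
--         return False
--
-- def is_hexdigit(c):
--     return ('0' <= c <= '9') or ('a' <= c <= 'f') or ('A' <= c <= 'F')
-- ===== SOURCE B (Python) =====
-- def is_hexint(s):
--     if not (s.startswith('0x') or s.startswith('0X')):
--         return False
--     body = s[2:]
--     if len(body) == 0 or body.endswith('_') or '__' in body:
--         return False
--     return all(c == '_' or is_hexdigit(c) for c in body)
--
-- def is_hexdigit(c):
--     return ('0' <= c <= '9') or ('a' <= c <= 'f') or ('A' <= c <= 'F')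
-- ===== Notes on version B (the rewrite author's own statement) =====
-- stated objective: simpler
-- what changed: Replaced the hand-written five-state DFA loop with a direct decomposition: check the '0x'/'0X' prefix, then validate the body by plain string predicates (nonempty, hex-or-underscore characters, no '__', no trailing '_').
import Mathlib
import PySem

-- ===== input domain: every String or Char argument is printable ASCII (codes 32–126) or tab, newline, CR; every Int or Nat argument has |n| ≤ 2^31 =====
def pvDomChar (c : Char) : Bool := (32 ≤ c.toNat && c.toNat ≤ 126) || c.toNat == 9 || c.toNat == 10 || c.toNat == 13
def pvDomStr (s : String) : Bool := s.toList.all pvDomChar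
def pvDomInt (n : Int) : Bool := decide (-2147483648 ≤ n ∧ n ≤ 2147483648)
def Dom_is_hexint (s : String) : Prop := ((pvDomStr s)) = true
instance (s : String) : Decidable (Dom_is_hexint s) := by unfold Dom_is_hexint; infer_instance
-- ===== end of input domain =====

-- B replaces A's five-state DFA loop by a prefix check plus plain body predicates (objective: simpler).


-- ===== PORT A =====
-- helper is_hexdigit of A
def is_hexdigitA (c : Char) : Bool :=
  ('0' ≤ c && c ≤ '9') || ('a' ≤ c && c ≤ 'f') || ('A' ≤ c && c ≤ 'F')

-- A's for-loop over the characters, carrying the state string; early 'return False' = false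
def goA (state : String) : List Char → Bool
  | [] => state == "q4"
  | c :: cs =>
    if state == "q1" then
      (if c == '0' then goA "q2" cs else false)
    else if state == "q2" then
      (if c == 'x' || c == 'X' then goA "q3" cs else false)
    else if state == "q3" then
      (if is_hexdigitA c then goA "q4" cs else if c == '_' then goA "q5" cs else false)
    else if state == "q4" then
      (if is_hexdigitA c then goA "q4" cs else if c == '_' then goA "q5" cs else false)
    else if state == "q5" then
      (if is_hexdigitA c then goA "q4" cs else false)
    else goA state cs  -- unreachable: Python's elif-chain would skip and keep looping

def is_hexint (s : String) : Bool :=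
  if PySem.Str.len s == 0 then false
  else goA "q1" s.toList

-- ===== PORT B =====
-- helper is_hexdigit of B
def is_hexdigitB (c : Char) : Bool :=
  ('0' ≤ c && c ≤ '9') || ('a' ≤ c && c ≤ 'f') || ('A' ≤ c && c ≤ 'F')

def is_hexint_alt (s : String) : Bool :=
  if !(PySem.Str.startswith s "0x" || PySem.Str.startswith s "0X") then false
  else
    let body := PySem.Str.slice s (some 2) none
    if PySem.Str.len body == 0 || PySem.Str.endswith body "_" || PySem.Str.isIn "__" body then false
    else body.toList.all (fun c => c == '_' || is_hexdigitB c)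

-- ===== PRECONDITION & SPEC =====
def Spec_is_hexint (s : String) (out : Bool) : Prop := out = is_hexint_alt s
instance (s : String) (out : Bool) : Decidable (Spec_is_hexint s out) := by unfold Spec_is_hexint; infer_instance

-- ===== CLAIM (what is proved, stated in full; the proofs are below) =====
def Claim_equal_is_hexint : Prop := ∀ (s : String), Dom_is_hexint s → Spec_is_hexint s (is_hexint s)

-- ===== LEMMAS AND PROOFS =====

-- body predicates, list-level (used only in proofs)
def hasDD : List Char → Bool
  | [] => false
  | [_] => false
  | a :: b :: r => (a == '_' && b == '_') || hasDD (b :: r)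

def endsUS : List Char → Bool
  | [] => false
  | [c] => c == '_'
  | _ :: b :: r => endsUS (b :: r)

def f4 (cs : List Char) : Bool :=
  cs.all (fun c => c == '_' || is_hexdigitB c) && !hasDD cs && !endsUS cs

def f5 : List Char → Bool
  | [] => false
  | d :: r => is_hexdigitA d && f4 r

lemma hex_ne_us {c : Char} (h : is_hexdigitA c = true) : (c == '_') = false := by
  by_contra hc
  have : c = '_' := by
    simpa using (eq_of_beq (by revert hc; cases (c == '_') <;> simp))
  subst this; exact absurd h (by decide)

lemma goA45 (cs : List Char) : goA "q4" cs = f4 cs ∧ goA "q5" cs = f5 cs := by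
  induction cs with
  | nil => constructor <;> rfl
  | cons c r ih =>
    have hAB : is_hexdigitA = is_hexdigitB := rfl
    constructor
    · show goA "q4" (c :: r) = f4 (c :: r)
      by_cases hh : is_hexdigitA c = true
      · have hne := hex_ne_us hh
        rw [show goA "q4" (c :: r) = goA "q4" r by simp [goA, hh], ih.1]
        cases r with
        | nil => simp [f4, hasDD, endsUS, hne, hh, ← hAB]
        | cons d r' =>
          simp [f4, hasDD, endsUS, hne, hh, ← hAB, Bool.and_assoc]
      · by_cases hu : (c == '_') = true
        · have hc : c = '_' := eq_of_beq hu
          rw [show goA "q4" (c :: r) = goA "q5" r by simp [goA, hh, hu], ih.2]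
          cases r with
          | nil => simp [f5, f4, hasDD, endsUS, hc]
          | cons d r' =>
            by_cases hd : is_hexdigitA d = true
            · have hdne := hex_ne_us hd
              cases r' with
              | nil => simp [f5, f4, hasDD, endsUS, hc, hd, hdne, ← hAB]
              | cons e r'' =>
                simp [f5, f4, hasDD, endsUS, hc, hd, hdne, ← hAB, Bool.and_assoc]
            · -- second char after '_' is not a hex digit: both sides false
              rw [show f5 (d :: r') = false by simp [f5, hd]]
              by_cases hdu : (d == '_') = true
              · simp [f4, hasDD, hc, hdu]
              · simp [f4, hc, ← hAB, hd, hdu]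
        · rw [show goA "q4" (c :: r) = false by simp [goA, hh, hu]]
          simp [f4, ← hAB, hh, hu]
    · show goA "q5" (c :: r) = f5 (c :: r)
      by_cases hh : is_hexdigitA c = true
      · rw [show goA "q5" (c :: r) = goA "q4" r by simp [goA, hh], ih.1]
        simp [f5, hh]
      · rw [show goA "q5" (c :: r) = false by simp [goA, hh]]
        simp [f5, hh]

lemma hasDD_iff (cs : List Char) : hasDD cs = true ↔ ['_', '_'] <:+: cs := by
  induction cs with
  | nil => simp [hasDD]
  | cons c r ih =>
    cases r with
    | nil =>
      simp only [hasDD]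
      constructor
      · intro h; simp at h
      · intro h; have := h.length_le; simp at this
    | cons d r' =>
      rw [List.infix_cons_iff]
      simp only [hasDD, Bool.or_eq_true, Bool.and_eq_true, beq_iff_eq]
      rw [ih]
      constructor
      · rintro (⟨hc, hd⟩ | h)
        · subst hc; subst hd; exact Or.inl ⟨r', rfl⟩
        · exact Or.inr h
      · rintro (⟨t, ht⟩ | h)
        · injection ht with h1 ht; injection ht with h2 _
          exact Or.inl ⟨h1.symm, h2.symm⟩
        · exact Or.inr h

lemma endsUS_iff (cs : List Char) : endsUS cs = true ↔ ['_'] <:+ cs := by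
  induction cs with
  | nil => simp [endsUS]
  | cons c r ih =>
    cases r with
    | nil =>
      simp only [endsUS, List.suffix_cons_iff, beq_iff_eq]
      constructor
      · intro h; subst h; exact Or.inl rfl
      · rintro (h | h)
        · injection h with h1 _; exact h1.symm
        · have := h.length_le; simp at this
    | cons d r' =>
      rw [show endsUS (c :: d :: r') = endsUS (d :: r') from rfl, ih]
      constructor
      · intro h; exact h.trans (List.suffix_cons c (d :: r'))
      · intro h
        rcases List.suffix_cons_iff.mp h with h | h
        · exfalso; have := congrArg List.length h; simp at this
        · exact h

lemma goA3 (cs : List Char) : goA "q3" cs = (!cs.isEmpty && goA "q4" cs) := by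
  cases cs with
  | nil => decide
  | cons c r => simp [goA]

lemma startswith2 (a b c0 c1 : Char) (rest : List Char) :
    PySem.Chars.startswith (c0 :: c1 :: rest) [a, b] = (c0 == a && c1 == b) := by
  by_cases h0 : c0 = a
  · by_cases h1 : c1 = b
    · subst h0; subst h1
      have hp : [c0, c1] <+: c0 :: c1 :: rest := ⟨rest, rfl⟩
      simp [(PySem.Chars.startswith_iff _ _).mpr hp]
    · have hn : ¬ ([a, b] <+: c0 :: c1 :: rest) := by
        rintro ⟨t, ht⟩
        injection ht with e1 ht; injection ht with e2 _
        exact h1 e2.symm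
      have hf : PySem.Chars.startswith (c0 :: c1 :: rest) [a, b] = false := by
        cases hx : PySem.Chars.startswith (c0 :: c1 :: rest) [a, b]
        · rfl
        · exact absurd ((PySem.Chars.startswith_iff _ _).mp hx) hn
      simp [hf, h1]
  · have hn : ¬ ([a, b] <+: c0 :: c1 :: rest) := by
      rintro ⟨t, ht⟩
      injection ht with e1 _
      exact h0 e1.symm
    have hf : PySem.Chars.startswith (c0 :: c1 :: rest) [a, b] = false := by
      cases hx : PySem.Chars.startswith (c0 :: c1 :: rest) [a, b]
      · rfl
      · exact absurd ((PySem.Chars.startswith_iff _ _).mp hx) hn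
    simp [hf, h0]

lemma main_list (cs : List Char) :
    (if cs.length == 0 then false else goA "q1" cs)
  = (if !(PySem.Chars.startswith cs ['0', 'x'] || PySem.Chars.startswith cs ['0', 'X']) then false
     else if ((PySem.List.slice cs (some 2) none).length == 0
              || PySem.Chars.endswith (PySem.List.slice cs (some 2) none) ['_']
              || PySem.Chars.isIn ['_', '_'] (PySem.List.slice cs (some 2) none)) then false
     else (PySem.List.slice cs (some 2) none).all (fun c => c == '_' || is_hexdigitB c)) := by
  have hsl : PySem.List.slice cs (some 2) none = cs.drop 2 := by
    simp [PySem.List.slice_from]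
  rw [hsl]
  cases cs with
  | nil => decide
  | cons c0 r1 =>
    cases r1 with
    | nil =>
      have h1 : PySem.Chars.startswith [c0] ['0', 'x'] = false := by
        cases hx : PySem.Chars.startswith [c0] ['0', 'x']
        · rfl
        · have := ((PySem.Chars.startswith_iff _ _).mp hx).length_le; simp at this
      have h2 : PySem.Chars.startswith [c0] ['0', 'X'] = false := by
        cases hx : PySem.Chars.startswith [c0] ['0', 'X']
        · rfl
        · have := ((PySem.Chars.startswith_iff _ _).mp hx).length_le; simp at this
      simp [h1, h2, goA]
    | cons c1 rest =>
      simp only [List.drop_succ_cons, List.drop_zero]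
      have hend : PySem.Chars.endswith rest ['_'] = endsUS rest := by
        rw [Bool.eq_iff_iff, PySem.Chars.endswith_iff, endsUS_iff]
      have hdd : PySem.Chars.isIn ['_', '_'] rest = hasDD rest := by
        rw [Bool.eq_iff_iff, PySem.Chars.isIn_iff_infix, hasDD_iff]
      have hemp : rest.isEmpty = (rest.length == 0) := by cases rest <;> simp
      rw [startswith2, startswith2, hend, hdd]
      simp only [goA, show (("q1" : String) == "q1") = true from rfl, if_true,
        List.length_cons, show ∀ n : Nat, (n + 1 == 0) = false from fun n => rfl,
        Bool.false_eq_true, if_false]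
      simp only [show (("q2" : String) == "q1") = false by decide,
        show (("q2" : String) == "q2") = true by decide,
        Bool.false_eq_true, if_false, if_true]
      rw [goA3, (goA45 rest).1]
      unfold f4
      rw [hemp]
      cases hc0 : (c0 == '0') <;> cases hc1 : (c1 == 'x') <;> cases hc2 : (c1 == 'X') <;>
        cases hre : (rest.length == 0) <;> cases h3 : endsUS rest <;> cases h4 : hasDD rest <;>
        cases h5 : rest.all (fun c => c == '_' || is_hexdigitB c) <;> simp_all

-- ===== VERDICT (by name: the statement is the Claim_ definition above) =====
lemma natCast_beq_zero (n : Nat) : ((n : Int) == 0) = (n == 0) := by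
  rw [Bool.eq_iff_iff, beq_iff_eq, beq_iff_eq]
  omega

theorem is_hexint_spec : Claim_equal_is_hexint := by
  intro s _
  show is_hexint s = is_hexint_alt s
  unfold is_hexint is_hexint_alt
  have h1 : "0x".toList = ['0', 'x'] := rfl
  have h2 : "0X".toList = ['0', 'X'] := rfl
  have h3 : "_".toList = ['_'] := rfl
  have h4 : "__".toList = ['_', '_'] := rfl
  simp only [PySem.Str.len_eq, PySem.Str.startswith_eq, PySem.Str.endswith_eq,
    PySem.Str.isIn_eq, PySem.Str.toList_slice, PySem.Chars.slice_eq_listSlice,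
    natCast_beq_zero, h1, h2, h3, h4]
  exact main_list s.toList
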